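-- pv_equiv track=rewrite | github.com/aria-ml/dataeval | src/dataeval/utils/data.py | _get_key_indices
-- ===== SOURCE A (Python) =====
-- from collections.abc import Iterable, Iterator, Mapping, Sequence
--
-- def _get_key_indices(keys: Iterable[tuple[str, ...]]) -> dict[tuple[str, ...], int]:
--     """
--     Finds indices to minimize unique tuple keys
--
--     Parameters
--     ----------
--     keys : Iterable[tuple[str, ...]]
--         Collection of unique expanded tuple keys
--
--     Returns
--     -------
--     dict[tuple[str, ...], int]
--         Mapping of tuple keys to starting index
--     """
--     indices = dict.fromkeys(keys, -1)
--     ks = list(keys)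
--     while len(ks) > 0:
--         seen: dict[tuple[str, ...], list[tuple[str, ...]]] = {}
--         for k in ks:
--             seen.setdefault(k[indices[k] :], []).append(k)
--         ks.clear()
--         for sk in seen.values():
--             if len(sk) > 1:
--                 ks.extend(sk)
--                 for k in sk:
--                     indices[k] -= 1
--     return indices
-- ===== SOURCE B (Python) =====
-- def _get_key_indices(keys):
--     """Map each tuple key to -(length of its shortest suffix distinct from every
--     other key's equal-length suffix), found per key via lazily built per-level
--     suffix counts."""
--     ks = list(keys)
--     counts = []  # counts[j-1]: occurrence count of each j-element suffix, built on demand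
--
--     def level(j):
--         while len(counts) < j:
--             n = len(counts) + 1
--             c = {}
--             for k in ks:
--                 s = k[-n:]
--                 c[s] = c.get(s, 0) + 1
--             counts.append(c)
--         return counts[j - 1]
--
--     out = {}
--     for k in ks:
--         m = 1
--         while level(m)[k[-m:]] > 1:
--             m += 1
--         out[k] = -m
--     return out
-- ===== Notes on version B (the rewrite author's own statement) =====
-- stated objective: alternative
-- what changed: A refines all keys in lock-step rounds, regrouping the still-colliding keys by their current suffix and decrementing their index each round; B instead searches per key for the shortest suffix length whose occurrence count (in lazily built per-length suffix-count tables) is 1, writing -m directly; Pre_ excludes lists with duplicate keys, on which A (and B) never terminate -- the function is documented for unique keys.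
import Mathlib
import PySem

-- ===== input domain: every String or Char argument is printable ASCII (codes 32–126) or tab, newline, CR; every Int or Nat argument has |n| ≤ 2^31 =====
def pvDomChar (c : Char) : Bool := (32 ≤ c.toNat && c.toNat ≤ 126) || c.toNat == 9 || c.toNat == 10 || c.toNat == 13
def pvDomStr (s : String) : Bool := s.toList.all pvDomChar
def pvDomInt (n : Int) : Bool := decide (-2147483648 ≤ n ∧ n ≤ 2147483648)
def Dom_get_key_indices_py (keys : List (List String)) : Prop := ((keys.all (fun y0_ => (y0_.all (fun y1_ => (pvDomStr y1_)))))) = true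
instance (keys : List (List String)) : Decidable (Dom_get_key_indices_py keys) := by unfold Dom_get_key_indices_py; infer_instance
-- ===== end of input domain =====

-- B replaces A's lock-step rounds of regroup-and-decrement with a per-key search for the
-- shortest suffix length whose occurrence count among all keys is 1 (alternative decomposition,
-- similar cost). Pre_ excludes lists with duplicate keys, on which the Python A never terminates.


-- ===== PORT A =====
-- indices = dict.fromkeys(keys, -1)
def pvFromKeys (keys : List (List String)) : PySem.Dict (List String) Int :=
  keys.foldl (fun d k => d.insert k (-1)) PySem.Dict.empty

-- for k in ks: seen.setdefault(k[indices[k]:], []).append(k)   (k is always a key of indices)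
def pvSeen (indices : PySem.Dict (List String) Int) (ks : List (List String)) :
    PySem.Dict (List String) (List (List String)) :=
  ks.foldl (fun s k =>
    s.modify (PySem.List.slice k (some (indices.getD k 0)) none) [] (· ++ [k]))
    PySem.Dict.empty

-- for k in sk: indices[k] -= 1
def pvDecr (sk : List (List String)) (d : PySem.Dict (List String) Int) :
    PySem.Dict (List String) Int :=
  sk.foldl (fun d k => d.modify k 0 (· - 1)) d

-- one iteration of the while body: build seen, clear ks, extend with the big groups
def pvRound (st : PySem.Dict (List String) Int × List (List String)) :
    PySem.Dict (List String) Int × List (List String) :=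
  (pvSeen st.1 st.2).values.foldl
    (fun st sk => if 1 < sk.length then (pvDecr sk st.1, st.2 ++ sk) else st)
    (st.1, [])

def pvMaxLen (keys : List (List String)) : Nat :=
  keys.foldl (fun a k => max a k.length) 0

-- while len(ks) > 0 — fuel pvMaxLen+2 provably suffices on every input satisfying Pre_
def pvLoopA : Nat → PySem.Dict (List String) Int × List (List String) →
    PySem.Dict (List String) Int
  | 0, st => st.1
  | fuel+1, st => if 0 < st.2.length then pvLoopA fuel (pvRound st) else st.1

def get_key_indices_py (keys : List (List String)) : List (List String × Int) :=
  (pvLoopA (pvMaxLen keys + 2) (pvFromKeys keys, keys)).items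

-- ===== PORT B =====
-- level(n): occurrence count of each n-element suffix among ks (Source B caches the levels;
-- the port recomputes the same pure value — memoization only)
def pvLevel (ks : List (List String)) (n : Nat) : PySem.Dict (List String) Int :=
  ks.foldl (fun c k =>
    c.modify (PySem.List.slice k (some (-(n : Int))) none) 0 (· + 1))
    PySem.Dict.empty

-- while level(m)[k[-m:]] > 1: m += 1   — fuel pvMaxLen+2 provably suffices under Pre_
def pvFind (ks : List (List String)) (k : List String) : Nat → Nat → Int
  | 0, m => -(m : Int)
  | fuel+1, m =>
    if 1 < (pvLevel ks m).getD (PySem.List.slice k (some (-(m : Int))) none) 0 then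
      pvFind ks k fuel (m+1)
    else -(m : Int)

def get_key_indices_py_alt (keys : List (List String)) : List (List String × Int) :=
  (keys.foldl (fun d k => d.insert k (pvFind keys k (pvMaxLen keys + 2) 1))
    PySem.Dict.empty).items

-- ===== PRECONDITION & SPEC =====
-- Pre_ excludes lists with duplicate keys: there the Python A loops forever (a duplicated
-- key's collision group never shrinks), so A returns no value (B's Python also diverges).
def Pre_get_key_indices_py (keys : List (List String)) : Prop := keys.Nodup
instance (keys : List (List String)) : Decidable (Pre_get_key_indices_py keys) := by
  unfold Pre_get_key_indices_py; infer_instance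

def pvWitness_get_key_indices_py : List (List String) := [["a"], ["b", "a"], ["c"]]

def Spec_get_key_indices_py (keys : List (List String)) (out : List (List String × Int)) : Prop :=
  out = get_key_indices_py_alt keys
instance (keys : List (List String)) (out : List (List String × Int)) :
    Decidable (Spec_get_key_indices_py keys out) := by
  unfold Spec_get_key_indices_py; infer_instance

-- ===== CLAIM (what is proved, stated in full; the proofs are below) =====
def Claim_equal_get_key_indices_py : Prop :=
  ∀ (keys : List (List String)), Dom_get_key_indices_py keys →
    Pre_get_key_indices_py keys →
    Spec_get_key_indices_py keys (get_key_indices_py keys)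

-- ===== LEMMAS AND PROOFS =====

-- the last-min(m, |k|) elements of k: what Python's k[-m:] computes for m ≥ 1
def sfx (m : Nat) (k : List String) : List String := k.drop (k.length - m)

-- k's length-m suffix differs from every other key's
def uniqAt (keys : List (List String)) (k : List String) (m : Nat) : Prop :=
  ∀ k' ∈ keys, k' ≠ k → sfx m k' ≠ sfx m k

-- the shortest distinguishing suffix length of k among keys
noncomputable def minM (keys : List (List String)) (k : List String) : Nat :=
  sInf {m : Nat | 1 ≤ m ∧ uniqAt keys k m}

lemma le_foldl_maxlen (keys : List (List String)) (a : Nat) :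
    a ≤ keys.foldl (fun a k => max a k.length) a ∧
    ∀ k ∈ keys, k.length ≤ keys.foldl (fun a k => max a k.length) a := by
  induction keys generalizing a with
  | nil => simp
  | cons x xs ih =>
    refine ⟨le_trans (le_max_left _ _) (ih (max a x.length)).1, ?_⟩
    intro k hk
    rcases List.mem_cons.mp hk with h | h
    · rw [h]
      exact le_trans (le_max_right _ _) (ih (max a x.length)).1
    · exact (ih (max a x.length)).2 k h

lemma len_le_maxLen (keys : List (List String)) (k : List String) (h : k ∈ keys) :
    k.length ≤ pvMaxLen keys := (le_foldl_maxlen keys 0).2 k h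

lemma sfx_of_ge (m : Nat) (k : List String) (h : k.length ≤ m) : sfx m k = k := by
  simp [sfx, Nat.sub_eq_zero_of_le h]

lemma uniqAt_top (keys : List (List String)) (k : List String) :
    uniqAt keys k (pvMaxLen keys + 1) := by
  intro k' hk' hne hcon
  have hlk' := len_le_maxLen keys k' hk'
  rw [sfx_of_ge _ k' (by omega)] at hcon
  have hlen : k'.length = k.length - (k.length - (pvMaxLen keys + 1)) := by
    rw [hcon]; simp [sfx]
  have hk_le : k.length ≤ pvMaxLen keys + 1 := by omega
  rw [sfx_of_ge _ k hk_le] at hcon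
  exact hne hcon

lemma minM_set_nonempty (keys : List (List String)) (k : List String) :
    (pvMaxLen keys + 1) ∈ {m : Nat | 1 ≤ m ∧ uniqAt keys k m} :=
  ⟨by omega, uniqAt_top keys k⟩

lemma minM_pos (keys : List (List String)) (k : List String) : 1 ≤ minM keys k :=
  (Nat.sInf_mem ⟨_, minM_set_nonempty keys k⟩).1

lemma minM_uniq (keys : List (List String)) (k : List String) :
    uniqAt keys k (minM keys k) :=
  (Nat.sInf_mem ⟨_, minM_set_nonempty keys k⟩).2

lemma minM_le (keys : List (List String)) (k : List String) :
    minM keys k ≤ pvMaxLen keys + 1 :=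
  Nat.sInf_le (minM_set_nonempty keys k)

lemma sfx_sfx (j m : Nat) (x : List String) (h : j ≤ m) : sfx j (sfx m x) = sfx j x := by
  simp only [sfx, List.length_drop, List.drop_drop]
  congr 1
  omega

lemma collide_mono (j m : Nat) (a b : List String) (h : j ≤ m) (hab : sfx m a = sfx m b) :
    sfx j a = sfx j b := by
  rw [← sfx_sfx j m a h, ← sfx_sfx j m b h, hab]

lemma uniq_mono (keys : List (List String)) (k : List String) (j m : Nat) (hjm : j ≤ m)
    (h : uniqAt keys k j) : uniqAt keys k m := by
  intro k' hk' hne hcon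
  exact h k' hk' hne (collide_mono j m k' k hjm hcon)

lemma uniqAt_iff (keys : List (List String)) (k : List String) (m : Nat) (hm : 1 ≤ m) :
    uniqAt keys k m ↔ minM keys k ≤ m := by
  constructor
  · intro h; exact Nat.sInf_le ⟨hm, h⟩
  · intro h; exact uniq_mono keys k _ m h (minM_uniq keys k)

-- a Nodup list with two distinct members has length > 1; conversely a Nodup list of
-- length > 1 has a member different from any given one
lemma one_lt_length_of_two_mem {l : List (List String)} {a b : List String}
    (ha : a ∈ l) (hb : b ∈ l) (hne : a ≠ b) : 1 < l.length := by
  rcases l with _ | ⟨x, _ | ⟨y, t⟩⟩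
  · simp at ha
  · rw [List.mem_singleton] at ha hb
    exact absurd (ha.trans hb.symm) hne
  · simp only [List.length_cons]
    omega

lemma exists_ne_of_one_lt_length {l : List (List String)} (hl : l.Nodup)
    (h : 1 < l.length) (k : List String) : ∃ a ∈ l, a ≠ k := by
  rcases l with _ | ⟨x, _ | ⟨y, t⟩⟩
  · simp at h
  · simp at h
  · have hx_nin : x ∉ y :: t := (List.nodup_cons.mp hl).1
    have hxy : x ≠ y := fun hc => hx_nin (hc ▸ List.mem_cons_self)
    by_cases hx : x = k
    · exact ⟨y, by simp, by rw [← hx]; exact hxy.symm⟩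
    · exact ⟨x, by simp, hx⟩

lemma not_uniqAt (keys : List (List String)) (k : List String) (m : Nat)
    (h : ¬ uniqAt keys k m) : ∃ k' ∈ keys, k' ≠ k ∧ sfx m k' = sfx m k := by
  by_contra hc
  exact h (fun k' hk' hne hcon => hc ⟨k', hk', hne, hcon⟩)

lemma countP_gt_one_iff (l : List (List String)) (hl : l.Nodup) (k : List String)
    (hk : k ∈ l) (n : Nat) :
    1 < l.countP (fun x => sfx n x == sfx n k) ↔
      ∃ k' ∈ l, k' ≠ k ∧ sfx n k' = sfx n k := by
  rw [List.countP_eq_length_filter]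
  constructor
  · intro h
    obtain ⟨a, ha, hak⟩ := exists_ne_of_one_lt_length (hl.filter _) h k
    rw [List.mem_filter] at ha
    exact ⟨a, ha.1, hak, by simpa using ha.2⟩
  · rintro ⟨k', hk', hne, hcon⟩
    have h1 : k ∈ l.filter (fun x => sfx n x == sfx n k) := by
      rw [List.mem_filter]; simp [hk]
    have h2 : k' ∈ l.filter (fun x => sfx n x == sfx n k) := by
      rw [List.mem_filter]; simp [hk', hcon]
    exact one_lt_length_of_two_mem h2 h1 hne

-- ----- B side -----

lemma getD_pvLevel (ks : List (List String)) (n : Nat) (hn : 1 ≤ n) (v : List String) :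
    (pvLevel ks n).getD v 0 = (ks.countP (fun k => sfx n k == v) : Int) := by
  unfold pvLevel
  rw [← List.foldl_map (f := fun k => PySem.List.slice k (some (-(n : Int))) none)
        (g := fun (d : PySem.Dict (List String) Int) x => d.modify x 0 (· + 1))]
  rw [PySem.Dict.getD_foldl_modify_add_one]
  rw [PySem.Dict.getD_empty, List.count_eq_countP, List.countP_map]
  have hfun : ((fun x => x == v) ∘ fun k => PySem.List.slice k (some (-(n : Int))) none)
      = (fun k => sfx n k == v) := by
    funext k
    rw [Function.comp_apply, PySem.List.slice_from_neg_natCast k n hn]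
    rfl
  rw [hfun, zero_add]

lemma pvFind_eq (ks : List (List String)) (k : List String) (hnd : ks.Nodup) (hk : k ∈ ks) :
    ∀ (fuel m : Nat), 1 ≤ m → m ≤ minM ks k → minM ks k ≤ m + fuel →
      pvFind ks k fuel m = -(minM ks k : Int) := by
  intro fuel
  induction fuel with
  | zero =>
    intro m h1 h2 h3
    have : m = minM ks k := by omega
    subst this
    rfl
  | succ fuel ih =>
    intro m h1 h2 h3
    have hcond : (1 < (pvLevel ks m).getD (PySem.List.slice k (some (-(m : Int))) none) 0)
        ↔ m < minM ks k := by
      rw [PySem.List.slice_from_neg_natCast k m h1]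
      have : (List.drop (k.length - m) k) = sfx m k := rfl
      rw [this, getD_pvLevel ks m h1]
      have hcast : (1 : Int) < (ks.countP (fun x => sfx m x == sfx m k) : Int) ↔
          1 < ks.countP (fun x => sfx m x == sfx m k) := by exact_mod_cast Iff.rfl
      rw [hcast, countP_gt_one_iff ks hnd k hk m]
      constructor
      · rintro ⟨k', hk', hne, hcon⟩
        have : ¬ uniqAt ks k m := fun h => h k' hk' hne hcon
        rw [uniqAt_iff ks k m h1] at this
        omega
      · intro h
        exact not_uniqAt ks k m (by rw [uniqAt_iff ks k m h1]; omega)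
    show (if 1 < (pvLevel ks m).getD (PySem.List.slice k (some (-(m : Int))) none) 0 then
        pvFind ks k fuel (m+1) else -(m : Int)) = -(minM ks k : Int)
    by_cases h : m < minM ks k
    · rw [if_pos (hcond.mpr h)]
      exact ih (m+1) (by omega) (by omega) (by omega)
    · have : m = minM ks k := by omega
      rw [if_neg (by rw [hcond]; omega)]
      rw [this]

lemma alt_eq (keys : List (List String)) (hnd : keys.Nodup) :
    get_key_indices_py_alt keys = keys.map (fun k => (k, -(minM keys k : Int))) := by
  unfold get_key_indices_py_alt
  rw [PySem.Dict.items_foldl_insert_fresh keys (fun a => a)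
        (fun a => pvFind keys a (pvMaxLen keys + 2) 1) PySem.Dict.empty
        (by intro a _; simp [PySem.Dict.contains_empty])
        (by simpa using hnd)]
  rw [show (PySem.Dict.empty : PySem.Dict (List String) Int).items = [] from rfl,
    List.nil_append]
  apply List.map_congr_left
  intro k hk
  rw [pvFind_eq keys k hnd hk (pvMaxLen keys + 2) 1 (by omega)
        (minM_pos keys k) (by have := minM_le keys k; omega)]
-- ----- A side -----

lemma keys_pvFromKeys (keys : List (List String)) (hnd : keys.Nodup) :
    (pvFromKeys keys).keys = keys := by
  unfold pvFromKeys
  rw [PySem.Dict.keys_foldl_insert keys (fun _ _ => (-1 : Int)) PySem.Dict.empty]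
  rw [PySem.Dict.keys_empty]
  exact PySem.Set.ofList_eq_self_of_nodup keys hnd

lemma getD_pvFromKeys (keys : List (List String)) (hnd : keys.Nodup) (v : List String)
    (hv : v ∈ keys) : (pvFromKeys keys).getD v 0 = -1 := by
  have hitems : (pvFromKeys keys).items = keys.map (fun k => (k, (-1 : Int))) := by
    unfold pvFromKeys
    rw [PySem.Dict.items_foldl_insert_fresh keys (fun a => a) (fun _ => (-1 : Int))
          PySem.Dict.empty (by intro a _; simp [PySem.Dict.contains_empty])
          (by simpa using hnd)]
    rw [show (PySem.Dict.empty : PySem.Dict (List String) Int).items = [] from rfl,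
      List.nil_append]
  have hmem : (v, (-1 : Int)) ∈ (pvFromKeys keys).items := by
    rw [hitems]; exact List.mem_map_of_mem hv
  exact PySem.Dict.getD_of_mem_items _ hmem (by rw [keys_pvFromKeys keys hnd]; exact hnd) 0

lemma getD_pvDecr (sk : List (List String)) (d : PySem.Dict (List String) Int)
    (v : List String) :
    (pvDecr sk d).getD v 0 = d.getD v 0 - (sk.count v : Int) := by
  induction sk generalizing d with
  | nil => simp [pvDecr]
  | cons x t ih =>
    show (pvDecr t (d.modify x 0 (· - 1))).getD v 0 = _
    rw [ih (d.modify x 0 (· - 1))]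
    rw [PySem.Dict.getD_modify d x v 0 (· - 1)]
    by_cases h : v = x
    · subst h
      rw [if_pos rfl]
      have hc1 : (v :: t).count v = t.count v + 1 := by simp
      rw [hc1]
      push_cast
      ring
    · rw [if_neg h]
      have hc2 : (x :: t).count v = t.count v := by
        simp [Ne.symm h]
      rw [hc2]

lemma set_update_self (xs : List (List String)) :
    ∀ (s : PySem.Set (List String)), (∀ x ∈ xs, x ∈ s) → PySem.Set.update s xs = s := by
  induction xs with
  | nil => intro s _; rfl
  | cons x t ih =>
    intro s h
    show PySem.Set.update (PySem.Set.add s x) t = s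
    rw [PySem.Set.add_of_mem (h x (.head _))]
    exact ih s (fun y hy => h y (.tail _ hy))

lemma keys_pvDecr (sk : List (List String)) (d : PySem.Dict (List String) Int)
    (h : ∀ v ∈ sk, v ∈ d.keys) : (pvDecr sk d).keys = d.keys := by
  unfold pvDecr
  rw [PySem.Dict.keys_foldl_modify_key sk (fun x => x) 0 (fun _ x => (· - 1)) d]
  rw [List.map_id_fun']
  exact set_update_self sk d.keys h

lemma pvSeen_eq (indices : PySem.Dict (List String) Int) (ks : List (List String))
    (r : Nat) (hr : 1 ≤ r) (hval : ∀ k ∈ ks, indices.getD k 0 = -(r : Int)) :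
    pvSeen indices ks =
      (ks.map (fun k => (sfx r k, k))).foldl
        (fun d p => d.modify p.1 [] (· ++ [p.2])) PySem.Dict.empty := by
  unfold pvSeen
  rw [List.foldl_map]
  apply PySem.List.foldl_congr_mem
  intro acc k hk
  rw [hval k hk, PySem.List.slice_from_neg_natCast k r hr]
  rfl

lemma seen_keys (ks : List (List String)) (r : Nat) :
    ((ks.map (fun k => (sfx r k, k))).foldl
        (fun d p => d.modify p.1 [] (· ++ [p.2])) PySem.Dict.empty).keys =
      PySem.List.dedup (ks.map (sfx r)) := by
  rw [show (fun (d : PySem.Dict (List String) (List (List String))) (p : List String × List String) => d.modify p.1 [] (· ++ [p.2]))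
        = (fun d p => d.modify ((fun (q : List String × List String) => q.1) p) [] ((fun (_ : PySem.Dict (List String) (List (List String))) (q : List String × List String) => (· ++ [q.2])) d p)) from rfl]
  rw [PySem.Dict.keys_foldl_modify_key]
  rw [PySem.Dict.keys_empty, List.map_map]
  rw [show ((fun (q : List String × List String) => q.1) ∘ fun k => (sfx r k, k)) = sfx r from rfl]
  rw [PySem.List.dedup_eq_ofList]
  rfl

lemma pairs_filter_snd (ks : List (List String)) (r : Nat) (c : List String) :
    ((ks.map (fun k => (sfx r k, k))).filter (fun p => p.1 == c)).map (fun x => x.2) =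
      ks.filter (fun k => sfx r k == c) := by
  induction ks with
  | nil => rfl
  | cons x t ih =>
    simp only [List.map_cons, List.filter_cons]
    by_cases hx : (sfx r x == c) = true
    · rw [if_pos hx, if_pos hx, List.map_cons, ih]
    · rw [if_neg hx, if_neg hx, ih]

lemma seen_getD (ks : List (List String)) (r : Nat) (c : List String) :
    ((ks.map (fun k => (sfx r k, k))).foldl
        (fun d p => d.modify p.1 [] (· ++ [p.2])) PySem.Dict.empty).getD c [] =
      ks.filter (fun k => sfx r k == c) := by
  rw [PySem.Dict.getD_foldl_modify_append]
  rw [PySem.Dict.getD_empty, List.nil_append]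
  exact pairs_filter_snd ks r c
-- group of suffix value c among the active keys
def grp (ks : List (List String)) (r : Nat) (c : List String) : List (List String) :=
  ks.filter (fun k => sfx r k == c)

lemma mem_grp (ks : List (List String)) (r : Nat) (c v : List String) :
    v ∈ grp ks r c ↔ v ∈ ks ∧ sfx r v = c := by
  simp [grp, List.mem_filter]

lemma roundFold (ks : List (List String)) (r : Nat) (hks : ks.Nodup) :
    ∀ (cs : List (List String)), cs.Nodup →
    ∀ (d : PySem.Dict (List String) Int) (acc : List (List String)),
      acc.Nodup → (∀ v ∈ acc, sfx r v ∉ cs ∨ v ∉ ks) → (∀ v ∈ ks, v ∈ d.keys) →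
      (∀ v, (((cs.map (grp ks r)).foldl
          (fun st sk => if 1 < sk.length then (pvDecr sk st.1, st.2 ++ sk) else st)
          (d, acc)).1).getD v 0 =
        d.getD v 0 - (if v ∈ ks ∧ sfx r v ∈ cs ∧ 1 < (grp ks r (sfx r v)).length then 1 else 0))
      ∧ (∀ v, v ∈ ((cs.map (grp ks r)).foldl
          (fun st sk => if 1 < sk.length then (pvDecr sk st.1, st.2 ++ sk) else st)
          (d, acc)).2 ↔
          v ∈ acc ∨ (v ∈ ks ∧ sfx r v ∈ cs ∧ 1 < (grp ks r (sfx r v)).length))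
      ∧ ((cs.map (grp ks r)).foldl
          (fun st sk => if 1 < sk.length then (pvDecr sk st.1, st.2 ++ sk) else st)
          (d, acc)).2.Nodup
      ∧ (((cs.map (grp ks r)).foldl
          (fun st sk => if 1 < sk.length then (pvDecr sk st.1, st.2 ++ sk) else st)
          (d, acc)).1).keys = d.keys := by
  intro cs
  induction cs with
  | nil =>
    intro _ d acc haccnd _ _
    exact ⟨fun v => by simp, fun v => by simp, haccnd, rfl⟩
  | cons c cs' ih =>
    intro hcsnd d acc haccnd hdis hksd
    have hc_notin : c ∉ cs' := by simp at hcsnd; tauto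
    have hcs'nd : cs'.Nodup := by simp at hcsnd; tauto
    simp only [List.map_cons, List.foldl_cons]
    by_cases hbig : 1 < (grp ks r c).length
    · rw [if_pos hbig]
      have haccnd' : (acc ++ grp ks r c).Nodup := by
        refine haccnd.append (hks.filter _) ?_
        intro v hva hvg
        rw [mem_grp] at hvg
        rcases hdis v hva with h | h
        · exact h (by rw [hvg.2]; exact .head _)
        · exact h hvg.1
      have hdis' : ∀ v ∈ acc ++ grp ks r c, sfx r v ∉ cs' ∨ v ∉ ks := by
        intro v hv
        rcases List.mem_append.mp hv with h | h
        · rcases hdis v h with h' | h'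
          · exact .inl (fun hc => h' (.tail _ hc))
          · exact .inr h'
        · rw [mem_grp] at h
          exact .inl (by rw [h.2]; exact hc_notin)
      have hksd' : ∀ v ∈ ks, v ∈ (pvDecr (grp ks r c) d).keys := by
        rw [keys_pvDecr _ _ (fun v hv => hksd v ((mem_grp ks r c v).mp hv).1)]
        exact hksd
      obtain ⟨ih1, ih2, ih3, ih4⟩ := ih hcs'nd (pvDecr (grp ks r c) d) (acc ++ grp ks r c)
        haccnd' hdis' hksd'
      refine ⟨?_, ?_, ih3, ?_⟩
      · intro v
        rw [ih1 v, getD_pvDecr]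
        have hndg : (grp ks r c).Nodup := by
          unfold grp
          exact hks.filter _
        have hcount : ((grp ks r c).count v : Int) =
            if v ∈ ks ∧ sfx r v = c then 1 else 0 := by
          rw [List.Nodup.count hndg]
          by_cases hgm : v ∈ grp ks r c
          · rw [if_pos hgm, if_pos ((mem_grp ks r c v).mp hgm)]
            norm_num
          · rw [if_neg hgm, if_neg (fun hcx => hgm ((mem_grp ks r c v).mpr hcx))]
            norm_num
        rw [hcount]
        have hsplit : (v ∈ ks ∧ sfx r v ∈ c :: cs' ∧ 1 < (grp ks r (sfx r v)).length)
            ↔ ((v ∈ ks ∧ sfx r v = c) ∨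
               (v ∈ ks ∧ sfx r v ∈ cs' ∧ 1 < (grp ks r (sfx r v)).length)) := by
          constructor
          · rintro ⟨h1, h2, h3⟩
            rcases List.mem_cons.mp h2 with h | h
            · exact Or.inl ⟨h1, h⟩
            · exact Or.inr ⟨h1, h, h3⟩
          · rintro (⟨h1, h2⟩ | ⟨h1, h2, h3⟩)
            · exact ⟨h1, by rw [h2]; exact List.mem_cons_self, by rw [h2]; exact hbig⟩
            · exact ⟨h1, List.mem_cons_of_mem _ h2, h3⟩
        by_cases hA : v ∈ ks ∧ sfx r v = c
        · have hB : ¬ (v ∈ ks ∧ sfx r v ∈ cs' ∧ 1 < (grp ks r (sfx r v)).length) := by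
            rintro ⟨_, h2, _⟩
            rw [hA.2] at h2
            exact hc_notin h2
          rw [if_pos hA, if_neg hB, if_pos (hsplit.mpr (Or.inl hA))]
          ring
        · rw [if_neg hA]
          by_cases hB : v ∈ ks ∧ sfx r v ∈ cs' ∧ 1 < (grp ks r (sfx r v)).length
          · rw [if_pos hB, if_pos (hsplit.mpr (Or.inr hB))]
            ring
          · rw [if_neg hB, if_neg (fun hx => ((hsplit.mp hx).elim hA hB))]
            ring
      · intro v
        rw [ih2 v, List.mem_append, mem_grp]
        constructor
        · rintro ((h | h) | h)
          · exact .inl h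
          · exact .inr ⟨h.1, by rw [h.2]; exact .head _, by rw [h.2]; exact hbig⟩
          · exact .inr ⟨h.1, .tail _ h.2.1, h.2.2⟩
        · rintro (h | ⟨h1, h2, h3⟩)
          · exact .inl (.inl h)
          · rcases List.mem_cons.mp h2 with h | h
            · exact .inl (.inr ⟨h1, h⟩)
            · exact .inr ⟨h1, h, h3⟩
      · rw [ih4, keys_pvDecr _ _ (fun v hv => hksd v ((mem_grp ks r c v).mp hv).1)]
    · rw [if_neg hbig]
      obtain ⟨ih1, ih2, ih3, ih4⟩ := ih hcs'nd d acc haccnd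
        (fun v hv => (hdis v hv).imp (fun h hc => h (.tail _ hc)) id) hksd
      have hshift : ∀ v, (v ∈ ks ∧ sfx r v ∈ c :: cs' ∧ 1 < (grp ks r (sfx r v)).length) ↔
          (v ∈ ks ∧ sfx r v ∈ cs' ∧ 1 < (grp ks r (sfx r v)).length) := by
        intro v
        constructor
        · rintro ⟨h1, h2, h3⟩
          rcases List.mem_cons.mp h2 with h | h
          · rw [h] at h3; exact absurd h3 hbig
          · exact ⟨h1, h, h3⟩
        · rintro ⟨h1, h2, h3⟩; exact ⟨h1, .tail _ h2, h3⟩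
      refine ⟨?_, ?_, ih3, ih4⟩
      · intro v
        rw [ih1 v]
        exact congrArg (fun z => d.getD v 0 - z) ((if_congr (hshift v) rfl rfl).symm)
      · intro v
        rw [ih2 v]
        exact or_congr Iff.rfl (hshift v).symm
lemma round_inv (keys0 : List (List String)) (_hnd0 : keys0.Nodup) (r : Nat) (hr : 1 ≤ r)
    (st : PySem.Dict (List String) Int × List (List String))
    (hkeys : st.1.keys = keys0)
    (hval : ∀ k ∈ keys0, st.1.getD k 0 = -(min r (minM keys0 k) : Int))
    (hksnd : st.2.Nodup)
    (hmem : ∀ k, k ∈ st.2 ↔ k ∈ keys0 ∧ r ≤ minM keys0 k) :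
    (pvRound st).1.keys = keys0 ∧
    (∀ k ∈ keys0, (pvRound st).1.getD k 0 = -(min (r+1) (minM keys0 k) : Int)) ∧
    (pvRound st).2.Nodup ∧
    (∀ k, k ∈ (pvRound st).2 ↔ k ∈ keys0 ∧ r+1 ≤ minM keys0 k) := by
  have hsub : ∀ k ∈ st.2, k ∈ keys0 := fun k hk => ((hmem k).mp hk).1
  have hvalr : ∀ k ∈ st.2, st.1.getD k 0 = -(r : Int) := by
    intro k hk
    have h := (hmem k).mp hk
    rw [hval k h.1]
    have h2 := h.2
    omega
  -- the key combinatorial equivalence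
  have hbig_iff : ∀ k, (k ∈ st.2 ∧ 1 < (grp st.2 r (sfx r k)).length) ↔
      (k ∈ keys0 ∧ r + 1 ≤ minM keys0 k) := by
    intro k
    constructor
    · rintro ⟨hk2, hbig⟩
      have hk0 := hsub k hk2
      refine ⟨hk0, ?_⟩
      have hgf : grp st.2 r (sfx r k) = List.filter (fun x => sfx r x == sfx r k) st.2 := rfl
      have hcnt : 1 < List.countP (fun x => sfx r x == sfx r k) st.2 := by
        rw [List.countP_eq_length_filter, ← hgf]
        exact hbig
      obtain ⟨k', hk', hne, hcon⟩ := (countP_gt_one_iff st.2 hksnd k hk2 r).mp hcnt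
      have : ¬ uniqAt keys0 k r := fun h => h k' (hsub k' hk') hne hcon
      rw [uniqAt_iff keys0 k r hr] at this
      omega
    · rintro ⟨hk0, hlt⟩
      have hk2 : k ∈ st.2 := (hmem k).mpr ⟨hk0, by omega⟩
      refine ⟨hk2, ?_⟩
      obtain ⟨k', hk'0, hne, hcon⟩ :=
        not_uniqAt keys0 k r (by rw [uniqAt_iff keys0 k r hr]; omega)
      have hk'2 : k' ∈ st.2 := by
        refine (hmem k').mpr ⟨hk'0, ?_⟩
        have : ¬ uniqAt keys0 k' r := fun h => h k hk0 (fun hc => hne hc.symm) hcon.symm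
        rw [uniqAt_iff keys0 k' r hr] at this
        omega
      have hgf : grp st.2 r (sfx r k) = List.filter (fun x => sfx r x == sfx r k) st.2 := rfl
      have hcnt := (countP_gt_one_iff st.2 hksnd k hk2 r).mpr ⟨k', hk'2, hne, hcon⟩
      rw [List.countP_eq_length_filter, ← hgf] at hcnt
      exact hcnt
  have hseen := pvSeen_eq st.1 st.2 r hr hvalr
  have hkeysnd : (pvSeen st.1 st.2).keys = PySem.List.dedup (st.2.map (sfx r)) := by
    rw [hseen]; exact seen_keys st.2 r
  have hvalues : (pvSeen st.1 st.2).values =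
      (PySem.List.dedup (st.2.map (sfx r))).map (grp st.2 r) := by
    rw [PySem.Dict.values_eq_map_keys _ (by rw [hkeysnd]; exact PySem.List.nodup_dedup _) []]
    rw [hkeysnd]
    apply List.map_congr_left
    intro c _
    rw [hseen, seen_getD]
    rfl
  have hRF := roundFold st.2 r hksnd (PySem.List.dedup (st.2.map (sfx r)))
    (PySem.List.nodup_dedup _) st.1 [] (by simp) (by simp)
    (fun v hv => by rw [hkeys]; exact hsub v hv)
  obtain ⟨h1, h2, h3, h4⟩ := hRF
  have hround : pvRound st = ((PySem.List.dedup (st.2.map (sfx r))).map (grp st.2 r)).foldl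
      (fun st sk => if 1 < sk.length then (pvDecr sk st.1, st.2 ++ sk) else st)
      (st.1, []) := by
    unfold pvRound
    rw [hvalues]
  have hcs_mem : ∀ k ∈ st.2, sfx r k ∈ PySem.List.dedup (st.2.map (sfx r)) := by
    intro k hk
    rw [PySem.List.mem_dedup]
    exact List.mem_map_of_mem hk
  have hcond_iff : ∀ k, (k ∈ st.2 ∧ sfx r k ∈ PySem.List.dedup (st.2.map (sfx r)) ∧
      1 < (grp st.2 r (sfx r k)).length) ↔ (k ∈ keys0 ∧ r + 1 ≤ minM keys0 k) := by
    intro k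
    rw [← hbig_iff k]
    constructor
    · rintro ⟨a, _, b⟩; exact ⟨a, b⟩
    · rintro ⟨a, b⟩; exact ⟨a, hcs_mem k a, b⟩
  refine ⟨by rw [hround, h4, hkeys], ?_, by rw [hround]; exact h3, ?_⟩
  · intro k hk0
    rw [hround, h1 k, hval k hk0]
    by_cases h : k ∈ keys0 ∧ r + 1 ≤ minM keys0 k
    · rw [if_pos ((hcond_iff k).mpr h)]
      have h2 := h.2
      omega
    · rw [if_neg (fun hx => h ((hcond_iff k).mp hx))]
      have hle : minM keys0 k ≤ r := by
        by_contra hcon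
        exact h ⟨hk0, by omega⟩
      omega
  · intro k
    rw [hround, h2 k]
    simp only [List.not_mem_nil, false_or]
    exact hcond_iff k

lemma loopA_eq (keys0 : List (List String)) (hnd0 : keys0.Nodup) :
    ∀ (fuel r : Nat) (st : PySem.Dict (List String) Int × List (List String)), 1 ≤ r →
      st.1.keys = keys0 →
      (∀ k ∈ keys0, st.1.getD k 0 = -(min r (minM keys0 k) : Int)) →
      st.2.Nodup → (∀ k, k ∈ st.2 ↔ k ∈ keys0 ∧ r ≤ minM keys0 k) →
      pvMaxLen keys0 + 2 ≤ fuel + r →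
      (pvLoopA fuel st).keys = keys0 ∧
      ∀ k ∈ keys0, (pvLoopA fuel st).getD k 0 = -(minM keys0 k : Int) := by
  intro fuel
  induction fuel with
  | zero =>
    intro r st hr hkeys hval _ hmem hfuel
    refine ⟨hkeys, ?_⟩
    intro k hk
    rw [show pvLoopA 0 st = st.1 from rfl, hval k hk]
    have h1 := minM_le keys0 k
    omega
  | succ fuel ih =>
    intro r st hr hkeys hval hksnd hmem hfuel
    rw [show pvLoopA (fuel+1) st
        = (if 0 < st.2.length then pvLoopA fuel (pvRound st) else st.1) from rfl]
    by_cases hlen : 0 < st.2.length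
    · obtain ⟨h1, h2, h3, h4⟩ := round_inv keys0 hnd0 r hr st hkeys hval hksnd hmem
      have hrec := ih (r+1) (pvRound st) (by omega) h1 h2 h3 h4 (by omega)
      rw [if_pos hlen]
      exact hrec
    · rw [if_neg hlen]
      have hempty : st.2 = [] := List.eq_nil_of_length_eq_zero (by omega)
      refine ⟨hkeys, ?_⟩
      intro k hk
      rw [hval k hk]
      have hnin : ¬ (k ∈ st.2) := by rw [hempty]; simp
      rw [hmem k] at hnin
      have hlt : minM keys0 k < r := by
        by_contra hcon
        exact hnin ⟨hk, by omega⟩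
      omega

lemma a_eq (keys : List (List String)) (hnd : keys.Nodup) :
    get_key_indices_py keys = keys.map (fun k => (k, -(minM keys k : Int))) := by
  unfold get_key_indices_py
  have hL := loopA_eq keys hnd (pvMaxLen keys + 2) 1 (pvFromKeys keys, keys) (by omega)
    (keys_pvFromKeys keys hnd)
    (by
      intro k hk
      rw [show ((pvFromKeys keys, keys) : _ × _).1 = pvFromKeys keys from rfl]
      rw [getD_pvFromKeys keys hnd k hk]
      have h1 := minM_pos keys k
      omega)
    hnd
    (by
      intro k
      constructor
      · intro hk
        exact ⟨hk, minM_pos keys k⟩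
      · intro hk
        exact hk.1)
    (by omega)
  obtain ⟨h1, h2⟩ := hL
  rw [PySem.Dict.items_eq_map_keys _ (by rw [h1]; exact hnd) 0, h1]
  apply List.map_congr_left
  intro k hk
  rw [h2 k hk]

-- ===== VERDICT (by name: the statement is the Claim_ definition above) =====
theorem get_key_indices_py_spec : Claim_equal_get_key_indices_py := by
  intro keys _ hpre
  unfold Spec_get_key_indices_py
  rw [a_eq keys hpre, alt_eq keys hpre]
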